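-- pv_equiv track=rewrite | github.com/blessleydylan/CP125-Class-Repo-2 | labs/lab03/exercise2/exercise2.py | count_stops
-- ===== SOURCE A (Python) =====
-- def count_stops(stations, start, stop):
--     station_number = 0
--     station_number2 = 0
--
--     # find start position
--     for item in stations:
--         if item == start:
--             break
--         station_number += 1
--     else:
--         return -1   # start not found
--
--     # find stop position
--     for item2 in stations:
--         if item2 == stop:
--             break
--         station_number2 += 1
--     else:
--         return -1   # stop not found
--
--     # calculate stops
--     if station_number > station_number2:
--         return station_number - station_number2
--     else:
--         return station_number2 - station_number
-- ===== SOURCE B (Python) =====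
-- def count_stops(stations, start, stop):
--     # One forward pass: find the first occurrence of EITHER station, then
--     # count steps until the other one appears. Correct because the first
--     # occurrences of start and stop are i and j with, say, i <= j; walking
--     # from i, the first later occurrence of the other name is j, so the
--     # step count equals |i - j|.
--     it = iter(stations)
--     for s in it:
--         if s == start or s == stop:
--             if start == stop:
--                 return 0
--             other = stop if s == start else start
--             dist = 1
--             for t in it:
--                 if t == other:
--                     return dist
--                 dist += 1
--             return -1
--     return -1
-- ===== Notes on version B (the rewrite author's own statement) =====
-- stated objective: alternative
-- what changed: Replaces two independent index-building scans plus a subtraction with a single forward pass that stops at the first occurrence of either station and then counts steps until the other appears (no indices maintained at all).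
import Mathlib
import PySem

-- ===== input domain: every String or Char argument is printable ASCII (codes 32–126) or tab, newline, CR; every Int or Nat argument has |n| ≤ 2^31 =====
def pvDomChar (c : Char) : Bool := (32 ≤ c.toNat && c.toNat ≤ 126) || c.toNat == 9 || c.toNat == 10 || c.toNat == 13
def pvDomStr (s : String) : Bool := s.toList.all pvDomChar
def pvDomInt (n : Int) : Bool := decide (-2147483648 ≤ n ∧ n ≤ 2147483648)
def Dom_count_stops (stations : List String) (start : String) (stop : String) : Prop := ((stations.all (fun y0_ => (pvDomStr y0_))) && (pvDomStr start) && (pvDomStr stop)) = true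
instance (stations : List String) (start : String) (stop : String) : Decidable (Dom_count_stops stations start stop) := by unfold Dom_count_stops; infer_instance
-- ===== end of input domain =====

-- B does the same task in one forward pass: stop at the first occurrence of either name, then count steps to the other; return value only, no side effects.

-- ===== PORT A =====
-- A's for/else loop: walk the list incrementing a counter, break at the first match (some counter), else none (→ return -1).
def pvFindLoop (l : List String) (target : String) (n : Int) : Option Int :=
  match l with
  | [] => none
  | x :: xs => if x = target then some n else pvFindLoop xs target (n + 1)

def count_stops (stations : List String) (start : String) (stop : String) : Int :=
  match pvFindLoop stations start 0 with
  | none => -1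
  | some station_number =>
    match pvFindLoop stations stop 0 with
    | none => -1
    | some station_number2 =>
      if station_number > station_number2 then station_number - station_number2
      else station_number2 - station_number

-- ===== PORT B =====
-- inner loop: for t in it: if t == other: return dist; dist += 1 / return -1
def pvScanOther (l : List String) (other : String) (dist : Int) : Int :=
  match l with
  | [] => -1
  | t :: ts => if t = other then dist else pvScanOther ts other (dist + 1)

-- outer loop: for s in it: if s == start or s == stop: … / return -1
def pvScanEither (l : List String) (start : String) (stop : String) : Int :=
  match l with
  | [] => -1
  | s :: ss =>
    if s = start ∨ s = stop then
      if start = stop then 0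
      else pvScanOther ss (if s = start then stop else start) 1
    else pvScanEither ss start stop

def count_stops_alt (stations : List String) (start : String) (stop : String) : Int :=
  pvScanEither stations start stop

-- ===== PRECONDITION & SPEC =====
def Spec_count_stops (stations : List String) (start : String) (stop : String) (out : Int) : Prop := out = count_stops_alt stations start stop
instance (stations : List String) (start : String) (stop : String) (out : Int) : Decidable (Spec_count_stops stations start stop out) := by unfold Spec_count_stops; infer_instance

-- ===== CLAIM (what is proved, stated in full; the proofs are below) =====
def Claim_equal_count_stops : Prop := ∀ (stations : List String) (start : String) (stop : String), Dom_count_stops stations start stop → Spec_count_stops stations start stop (count_stops stations start stop)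

-- ===== LEMMAS AND PROOFS =====

-- pvFindLoop returns an index at least its starting counter.
theorem pvFindLoop_ge (l : List String) (t : String) (n k : Int)
    (h : pvFindLoop l t n = some k) : n ≤ k := by
  induction l generalizing n with
  | nil => simp [pvFindLoop] at h
  | cons x xs ih =>
    simp only [pvFindLoop] at h
    split at h
    · cases h; exact le_refl _
    · have := ih (n + 1) h; omega

-- shifting the starting counter shifts the found index.
theorem pvFindLoop_shift (l : List String) (t : String) (n : Int) :
    pvFindLoop l t n = (pvFindLoop l t 0).map (· + n) := by
  induction l generalizing n with
  | nil => simp [pvFindLoop]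
  | cons x xs ih =>
    simp only [pvFindLoop]
    split
    · simp
    · simp only [zero_add]
      rw [ih (n + 1), ih 1]
      cases pvFindLoop xs t 0 <;> simp <;> ring

-- B's counting inner loop computes exactly the first index (offset by dist) or -1.
theorem pvScanOther_eq (l : List String) (other : String) (d : Int) :
    pvScanOther l other d =
      match pvFindLoop l other d with
      | none => -1
      | some k => k := by
  induction l generalizing d with
  | nil => simp [pvScanOther, pvFindLoop]
  | cons x xs ih =>
    simp only [pvScanOther, pvFindLoop]
    split <;> simp [ih]

-- ===== VERDICT (by name: the statement is the Claim_ definition above) =====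
theorem count_stops_spec : Claim_equal_count_stops := by
  intro stations start stop hdom
  unfold Spec_count_stops count_stops_alt
  induction stations with
  | nil => simp [count_stops, pvFindLoop, pvScanEither]
  | cons x xs ih =>
    by_cases hxs : x = start
    · by_cases hss : start = stop
      · have hx2 : x = stop := hxs.trans hss
        simp [pvScanEither, count_stops, pvFindLoop, hxs, hss]
      · have hxt : x ≠ stop := fun h => hss (hxs.symm.trans h)
        simp only [pvScanEither, count_stops, pvFindLoop,
          if_pos (Or.inl hxs), if_neg hss, if_pos hxs, if_neg hxt, zero_add]
        rw [pvScanOther_eq]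
        cases h : pvFindLoop xs stop 1 with
        | none => rfl
        | some k =>
          have := pvFindLoop_ge xs stop 1 k h
          simp only [show ((match some k with | none => (-1 : Int) | some k => k)) = k from rfl]
          split <;> omega
    · by_cases hxt : x = stop
      · have hss : start ≠ stop := fun h => hxs (hxt.trans h.symm)
        simp only [pvScanEither, count_stops, pvFindLoop,
          if_pos (Or.inr hxt), if_neg hss, if_neg hxs, if_pos hxt, zero_add]
        rw [pvScanOther_eq]
        cases h : pvFindLoop xs start 1 with
        | none => rfl
        | some k =>
          have := pvFindLoop_ge xs start 1 k h
          simp only [show ((match some k with | none => (-1 : Int) | some k => k)) = k from rfl]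
          split <;> omega
      · have hor : ¬ (x = start ∨ x = stop) := by tauto
        have hdom2 : Dom_count_stops xs start stop := by
          revert hdom; unfold Dom_count_stops; simp [List.all_cons]; tauto
        simp only [pvScanEither, if_neg hor]
        rw [← ih hdom2]
        unfold count_stops
        simp only [pvFindLoop, if_neg hxs, if_neg hxt, zero_add]
        rw [pvFindLoop_shift xs start 1, pvFindLoop_shift xs stop 1]
        cases pvFindLoop xs start 0 <;> cases pvFindLoop xs stop 0 <;> simp <;> split <;> split <;> omega
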